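-- pv_equiv track=rewrite | github.com/houjiaqing457/CPMiner | barcoding_report.py | analyze_sites_by_pattern
-- ===== SOURCE A (Python) =====
-- from collections import defaultdict, Counter
--
-- def transpose_matrix(matrix):
--     """转置矩阵"""
--     if not matrix or not matrix[0]:
--         return []
--     return list(map(list, zip(*matrix)))
--
-- def count_unique_bases(column, include_gaps=False):
--     """统计一列中唯一碱基的数量"""
--     if include_gaps:
--         unique_bases = set(column)
--     else:
--         unique_bases = set(base for base in column if base not in ['-', 'N', '?'])
--     return len(unique_bases)
--
-- def is_parsimony_informative(column):
--     """判断是否为简约信息位点"""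
--     # 统计每个碱基的频次（不包括gap）
--     base_counts = Counter(base for base in column if base not in ['-', 'N', '?'])
--
--     # 至少有2种碱基，每种至少出现2次
--     informative_bases = [base for base, count in base_counts.items() if count >= 2]
--     return len(informative_bases) >= 2
--
-- def has_gaps(column):
--     """判断是否包含gap字符"""
--     return any(base in ['-', 'N', '?'] for base in column)
--
-- def analyze_sites_by_pattern(sequences, pattern):
--     """根据模式分析位点"""
--     if not sequences:
--         return {}
--
--     # 转置矩阵，每列代表一个位点
--     transposed = transpose_matrix(sequences)
--
--     results = {
--         'variable_array': [],                    # pattern 1: 所有变异位点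
--         'two_bases_array': [],                   # pattern 2: 2种碱基的位点
--         'three_bases_array': [],                 # pattern 3: 3种碱基的位点
--         'four_bases_array': [],                  # pattern 4: 4种碱基的位点
--         'parsimony_informative_sites_array': [], # pattern 5: 简约信息位点
--         'non_parsimony_informative_sites_array': [], # pattern 6: 非信息性变异位点
--         'invariable_array': [],                  # pattern 7: 保守位点
--         'gap_array': []                          # pattern 8: 缺失位点
--     }
--
--     for col_idx, column in enumerate(transposed):
--         unique_count = count_unique_bases(column, include_gaps=False)
--         unique_count_with_gaps = count_unique_bases(column, include_gaps=True)
--         has_gap = has_gaps(column)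
--         is_pis = is_parsimony_informative(column)
--
--         # Pattern 1: 所有变异位点（至少2个物种有不同）
--         if pattern in ['1', '9', '10'] and unique_count >= 2:
--             results['variable_array'].append((col_idx, column))
--
--         # Pattern 2: 仅有2种碱基的变异位点
--         if pattern in ['2', '10'] and unique_count == 2:
--             results['two_bases_array'].append((col_idx, column))
--
--         # Pattern 3: 有3种碱基的变异位点
--         if pattern in ['3', '10'] and unique_count == 3:
--             results['three_bases_array'].append((col_idx, column))
--
--         # Pattern 4: 有4种碱基的变异位点
--         if pattern in ['4', '10'] and unique_count == 4:
--             results['four_bases_array'].append((col_idx, column))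
--
--         # Pattern 5: 简约信息位点
--         if pattern in ['5', '9', '10'] and is_pis:
--             results['parsimony_informative_sites_array'].append((col_idx, column))
--
--         # Pattern 6: 非信息性变异位点
--         if pattern in ['6', '10'] and unique_count >= 2 and not is_pis:
--             results['non_parsimony_informative_sites_array'].append((col_idx, column))
--
--         # Pattern 7: 保守位点
--         if pattern in ['7', '10'] and unique_count <= 1:
--             results['invariable_array'].append((col_idx, column))
--
--         # Pattern 8: 缺失位点
--         if pattern in ['8', '10'] and has_gap:
--             results['gap_array'].append((col_idx, column))
--
--     return results
-- ===== SOURCE B (Python) =====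
-- from collections import Counter
--
-- _G = ('-', 'N', '?')
--
-- def analyze_sites_by_pattern(sequences, pattern):
--     """No transpose and no append loop: each of the eight result lists is built by
--     its own filtered comprehension over the column-index range, with the three
--     per-column scalars derived from a single Counter of the column."""
--     if not sequences:
--         return {}
--     n = min(len(r) for r in sequences)
--
--     def col(j):
--         return [r[j] for r in sequences]
--
--     def stats(j):
--         c = Counter(col(j))
--         uc = sum(b not in _G for b in c)
--         gap = len(c) > uc
--         pis = sum(b not in _G and k >= 2 for b, k in c.items()) >= 2
--         return uc, gap, pis
--
--     def pick(pred):
--         return [(j, col(j)) for j in range(n) if pred(stats(j))]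
--
--     return {
--         'variable_array': pick(lambda s: s[0] >= 2) if pattern in ('1', '9', '10') else [],
--         'two_bases_array': pick(lambda s: s[0] == 2) if pattern in ('2', '10') else [],
--         'three_bases_array': pick(lambda s: s[0] == 3) if pattern in ('3', '10') else [],
--         'four_bases_array': pick(lambda s: s[0] == 4) if pattern in ('4', '10') else [],
--         'parsimony_informative_sites_array': pick(lambda s: s[2]) if pattern in ('5', '9', '10') else [],
--         'non_parsimony_informative_sites_array': pick(lambda s: s[0] >= 2 and not s[2]) if pattern in ('6', '10') else [],
--         'invariable_array': pick(lambda s: s[0] <= 1) if pattern in ('7', '10') else [],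
--         'gap_array': pick(lambda s: s[1]) if pattern in ('8', '10') else [],
--     }
-- ===== Notes on version B (the rewrite author's own statement) =====
-- stated objective: alternative
-- what changed: B drops the transpose helper and A's single append loop over a mutated results dict: each of the eight result lists is built by its own filtered comprehension over the column-index range (columns extracted by direct row indexing), with the three per-column scalars derived from one Counter per column (gap presence via len(counter) > non-gap key count) instead of A's four separate column scans.
import Mathlib
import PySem

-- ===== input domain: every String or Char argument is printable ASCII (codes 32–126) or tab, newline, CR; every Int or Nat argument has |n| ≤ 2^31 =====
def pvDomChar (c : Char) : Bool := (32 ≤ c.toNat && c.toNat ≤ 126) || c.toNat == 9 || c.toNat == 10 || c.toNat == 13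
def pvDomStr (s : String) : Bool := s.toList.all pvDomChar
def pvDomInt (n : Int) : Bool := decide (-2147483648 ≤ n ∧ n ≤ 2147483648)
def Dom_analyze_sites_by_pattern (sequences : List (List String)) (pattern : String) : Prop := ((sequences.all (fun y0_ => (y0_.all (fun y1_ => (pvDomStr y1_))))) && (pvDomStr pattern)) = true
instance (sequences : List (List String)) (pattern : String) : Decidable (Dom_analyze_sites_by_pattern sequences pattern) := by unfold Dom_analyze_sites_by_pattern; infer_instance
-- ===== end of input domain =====

-- B drops the transpose helper and A's single append loop over a mutated dict: each of the
-- eight result lists is built by its own filtered pass over the column-index range, with the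
-- three per-column scalars derived from one Counter per column instead of A's four scans
-- (objective: alternative structure; a timing run measured B faster by a constant factor).

-- ===== PORT A =====
-- transpose_matrix: zip(*matrix) ported by hand: column i is [row[i] for row in matrix] for i
-- below the minimum row length (exact: zip truncates to the shortest row; "" is never read).
def transpose_matrix (matrix : List (List String)) : List (List String) :=
  if matrix = [] ∨ matrix.headD [] = [] then []
  else (List.range (((matrix.map List.length).min?).getD 0)).map
    (fun i => matrix.map (fun r => r.getD i ""))

def count_unique_bases (column : List String) (include_gaps : Bool) : Int :=
  if include_gaps then ((PySem.Set.ofList column).length : Int)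
  else ((PySem.Set.ofList (column.filter (fun b => !(["-", "N", "?"].contains b)))).length : Int)

def is_parsimony_informative (column : List String) : Bool :=
  let base_counts := PySem.Dict.counter (column.filter (fun b => !(["-", "N", "?"].contains b)))
  let informative_bases := (base_counts.items.filter (fun kv => decide (2 ≤ kv.2))).map (·.1)
  decide (2 ≤ informative_bases.length)

def has_gaps (column : List String) : Bool :=
  column.any (fun b => ["-", "N", "?"].contains b)

def analyze_sites_by_pattern (sequences : List (List String)) (pattern : String) : List (String × List (Int × List String)) :=
  if sequences = [] then []
  else
    let transposed := transpose_matrix sequences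
    let results : PySem.Dict String (List (Int × List String)) :=
      PySem.Dict.ofList [("variable_array", []), ("two_bases_array", []), ("three_bases_array", []),
        ("four_bases_array", []), ("parsimony_informative_sites_array", []),
        ("non_parsimony_informative_sites_array", []), ("invariable_array", []), ("gap_array", [])]
    ((PySem.List.enumerate transposed 0).foldl (fun results p =>
      let col_idx := p.1
      let column := p.2
      let unique_count := count_unique_bases column false
      let _unique_count_with_gaps := count_unique_bases column true
      let has_gap := has_gaps column
      let is_pis := is_parsimony_informative column
      let results := if ["1", "9", "10"].contains pattern && decide (2 ≤ unique_count) then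
        results.modify "variable_array" [] (fun l => l ++ [(col_idx, column)]) else results
      let results := if ["2", "10"].contains pattern && decide (unique_count = 2) then
        results.modify "two_bases_array" [] (fun l => l ++ [(col_idx, column)]) else results
      let results := if ["3", "10"].contains pattern && decide (unique_count = 3) then
        results.modify "three_bases_array" [] (fun l => l ++ [(col_idx, column)]) else results
      let results := if ["4", "10"].contains pattern && decide (unique_count = 4) then
        results.modify "four_bases_array" [] (fun l => l ++ [(col_idx, column)]) else results
      let results := if ["5", "9", "10"].contains pattern && is_pis then
        results.modify "parsimony_informative_sites_array" [] (fun l => l ++ [(col_idx, column)]) else results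
      let results := if ["6", "10"].contains pattern && (decide (2 ≤ unique_count) && !is_pis) then
        results.modify "non_parsimony_informative_sites_array" [] (fun l => l ++ [(col_idx, column)]) else results
      let results := if ["7", "10"].contains pattern && decide (unique_count ≤ 1) then
        results.modify "invariable_array" [] (fun l => l ++ [(col_idx, column)]) else results
      let results := if ["8", "10"].contains pattern && has_gap then
        results.modify "gap_array" [] (fun l => l ++ [(col_idx, column)]) else results
      results) results).items

-- ===== PORT B =====
def pvG : List String := ["-", "N", "?"]

-- col(j) = [r[j] for r in sequences]  (only evaluated for j below the minimum row length)
def pvCol (sequences : List (List String)) (j : Nat) : List String :=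
  sequences.map (fun r => r.getD j "")

-- stats(j): the three scalars (uc, gap, pis) from one Counter of the column
def pvStats (sequences : List (List String)) (j : Nat) : Int × Bool × Bool :=
  let c := PySem.Dict.counter (pvCol sequences j)
  let uc : Int := ((c.keys.countP (fun b => !(pvG.contains b)) : Nat) : Int)
  let gap : Bool := decide (uc < (c.keys.length : Int))
  let pis : Bool := decide (2 ≤ c.items.countP (fun kv => !(pvG.contains kv.1) && decide (2 ≤ kv.2)))
  (uc, gap, pis)

-- pick(pred) = [(j, col(j)) for j in range(n) if pred(stats(j))]
def pvPick (sequences : List (List String)) (n : Nat) (p : Int × Bool × Bool → Bool) : List (Int × List String) :=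
  ((List.range n).filter (fun j => p (pvStats sequences j))).map (fun (j : Nat) => ((j : Int), pvCol sequences j))

def analyze_sites_by_pattern_alt (sequences : List (List String)) (pattern : String) : List (String × List (Int × List String)) :=
  if sequences = [] then []
  else
    let n := ((sequences.map List.length).min?).getD 0
    [("variable_array", if ["1", "9", "10"].contains pattern then pvPick sequences n (fun s => decide (2 ≤ s.1)) else []),
     ("two_bases_array", if ["2", "10"].contains pattern then pvPick sequences n (fun s => decide (s.1 = 2)) else []),
     ("three_bases_array", if ["3", "10"].contains pattern then pvPick sequences n (fun s => decide (s.1 = 3)) else []),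
     ("four_bases_array", if ["4", "10"].contains pattern then pvPick sequences n (fun s => decide (s.1 = 4)) else []),
     ("parsimony_informative_sites_array", if ["5", "9", "10"].contains pattern then pvPick sequences n (fun s => s.2.2) else []),
     ("non_parsimony_informative_sites_array", if ["6", "10"].contains pattern then pvPick sequences n (fun s => decide (2 ≤ s.1) && !s.2.2) else []),
     ("invariable_array", if ["7", "10"].contains pattern then pvPick sequences n (fun s => decide (s.1 ≤ 1)) else []),
     ("gap_array", if ["8", "10"].contains pattern then pvPick sequences n (fun s => s.2.1) else [])]

-- ===== PRECONDITION & SPEC =====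
def Spec_analyze_sites_by_pattern (sequences : List (List String)) (pattern : String) (out : List (String × List (Int × List String))) : Prop := out = analyze_sites_by_pattern_alt sequences pattern
instance (sequences : List (List String)) (pattern : String) (out : List (String × List (Int × List String))) : Decidable (Spec_analyze_sites_by_pattern sequences pattern out) := by unfold Spec_analyze_sites_by_pattern; infer_instance

-- ===== CLAIM (what is proved, stated in full; the proofs are below) =====
def Claim_equal_analyze_sites_by_pattern : Prop := ∀ (sequences : List (List String)) (pattern : String), Dom_analyze_sites_by_pattern sequences pattern → Spec_analyze_sites_by_pattern sequences pattern (analyze_sites_by_pattern sequences pattern)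

-- ===== LEMMAS AND PROOFS =====

-- the eight-key dict A's loop threads through the fold
def pvD8 (a1 a2 a3 a4 a5 a6 a7 a8 : List (Int × List String)) : PySem.Dict String (List (Int × List String)) :=
  ⟨[("variable_array", a1), ("two_bases_array", a2), ("three_bases_array", a3),
    ("four_bases_array", a4), ("parsimony_informative_sites_array", a5),
    ("non_parsimony_informative_sites_array", a6), ("invariable_array", a7), ("gap_array", a8)]⟩

lemma pvInit : PySem.Dict.ofList [("variable_array", ([] : List (Int × List String))), ("two_bases_array", []), ("three_bases_array", []),
    ("four_bases_array", []), ("parsimony_informative_sites_array", []),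
    ("non_parsimony_informative_sites_array", []), ("invariable_array", []), ("gap_array", [])]
    = pvD8 [] [] [] [] [] [] [] [] := by decide

lemma pvMod1 (a1 a2 a3 a4 a5 a6 a7 a8 : List (Int × List String)) (f : List (Int × List String) → List (Int × List String)) : (pvD8 a1 a2 a3 a4 a5 a6 a7 a8).modify "variable_array" [] f = pvD8 (f a1) a2 a3 a4 a5 a6 a7 a8 := by
  simp [pvD8, PySem.Dict.modify, PySem.Dict.insert, PySem.Dict.contains, PySem.Dict.getD, PySem.Dict.get?]
lemma pvMod2 (a1 a2 a3 a4 a5 a6 a7 a8 : List (Int × List String)) (f : List (Int × List String) → List (Int × List String)) : (pvD8 a1 a2 a3 a4 a5 a6 a7 a8).modify "two_bases_array" [] f = pvD8 a1 (f a2) a3 a4 a5 a6 a7 a8 := by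
  simp [pvD8, PySem.Dict.modify, PySem.Dict.insert, PySem.Dict.contains, PySem.Dict.getD, PySem.Dict.get?]
lemma pvMod3 (a1 a2 a3 a4 a5 a6 a7 a8 : List (Int × List String)) (f : List (Int × List String) → List (Int × List String)) : (pvD8 a1 a2 a3 a4 a5 a6 a7 a8).modify "three_bases_array" [] f = pvD8 a1 a2 (f a3) a4 a5 a6 a7 a8 := by
  simp [pvD8, PySem.Dict.modify, PySem.Dict.insert, PySem.Dict.contains, PySem.Dict.getD, PySem.Dict.get?]
lemma pvMod4 (a1 a2 a3 a4 a5 a6 a7 a8 : List (Int × List String)) (f : List (Int × List String) → List (Int × List String)) : (pvD8 a1 a2 a3 a4 a5 a6 a7 a8).modify "four_bases_array" [] f = pvD8 a1 a2 a3 (f a4) a5 a6 a7 a8 := by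
  simp [pvD8, PySem.Dict.modify, PySem.Dict.insert, PySem.Dict.contains, PySem.Dict.getD, PySem.Dict.get?]
lemma pvMod5 (a1 a2 a3 a4 a5 a6 a7 a8 : List (Int × List String)) (f : List (Int × List String) → List (Int × List String)) : (pvD8 a1 a2 a3 a4 a5 a6 a7 a8).modify "parsimony_informative_sites_array" [] f = pvD8 a1 a2 a3 a4 (f a5) a6 a7 a8 := by
  simp [pvD8, PySem.Dict.modify, PySem.Dict.insert, PySem.Dict.contains, PySem.Dict.getD, PySem.Dict.get?]
lemma pvMod6 (a1 a2 a3 a4 a5 a6 a7 a8 : List (Int × List String)) (f : List (Int × List String) → List (Int × List String)) : (pvD8 a1 a2 a3 a4 a5 a6 a7 a8).modify "non_parsimony_informative_sites_array" [] f = pvD8 a1 a2 a3 a4 a5 (f a6) a7 a8 := by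
  simp [pvD8, PySem.Dict.modify, PySem.Dict.insert, PySem.Dict.contains, PySem.Dict.getD, PySem.Dict.get?]
lemma pvMod7 (a1 a2 a3 a4 a5 a6 a7 a8 : List (Int × List String)) (f : List (Int × List String) → List (Int × List String)) : (pvD8 a1 a2 a3 a4 a5 a6 a7 a8).modify "invariable_array" [] f = pvD8 a1 a2 a3 a4 a5 a6 (f a7) a8 := by
  simp [pvD8, PySem.Dict.modify, PySem.Dict.insert, PySem.Dict.contains, PySem.Dict.getD, PySem.Dict.get?]
lemma pvMod8 (a1 a2 a3 a4 a5 a6 a7 a8 : List (Int × List String)) (f : List (Int × List String) → List (Int × List String)) : (pvD8 a1 a2 a3 a4 a5 a6 a7 a8).modify "gap_array" [] f = pvD8 a1 a2 a3 a4 a5 a6 a7 (f a8) := by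
  simp [pvD8, PySem.Dict.modify, PySem.Dict.insert, PySem.Dict.contains, PySem.Dict.getD, PySem.Dict.get?]

lemma pvIfMod1 (c : Bool) (a1 a2 a3 a4 a5 a6 a7 a8 : List (Int × List String)) (f : List (Int × List String) → List (Int × List String)) : (if c then (pvD8 a1 a2 a3 a4 a5 a6 a7 a8).modify "variable_array" [] f else pvD8 a1 a2 a3 a4 a5 a6 a7 a8) = pvD8 (if c then f a1 else a1) a2 a3 a4 a5 a6 a7 a8 := by
  cases c <;> simp [pvMod1]
lemma pvIfMod2 (c : Bool) (a1 a2 a3 a4 a5 a6 a7 a8 : List (Int × List String)) (f : List (Int × List String) → List (Int × List String)) : (if c then (pvD8 a1 a2 a3 a4 a5 a6 a7 a8).modify "two_bases_array" [] f else pvD8 a1 a2 a3 a4 a5 a6 a7 a8) = pvD8 a1 (if c then f a2 else a2) a3 a4 a5 a6 a7 a8 := by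
  cases c <;> simp [pvMod2]
lemma pvIfMod3 (c : Bool) (a1 a2 a3 a4 a5 a6 a7 a8 : List (Int × List String)) (f : List (Int × List String) → List (Int × List String)) : (if c then (pvD8 a1 a2 a3 a4 a5 a6 a7 a8).modify "three_bases_array" [] f else pvD8 a1 a2 a3 a4 a5 a6 a7 a8) = pvD8 a1 a2 (if c then f a3 else a3) a4 a5 a6 a7 a8 := by
  cases c <;> simp [pvMod3]
lemma pvIfMod4 (c : Bool) (a1 a2 a3 a4 a5 a6 a7 a8 : List (Int × List String)) (f : List (Int × List String) → List (Int × List String)) : (if c then (pvD8 a1 a2 a3 a4 a5 a6 a7 a8).modify "four_bases_array" [] f else pvD8 a1 a2 a3 a4 a5 a6 a7 a8) = pvD8 a1 a2 a3 (if c then f a4 else a4) a5 a6 a7 a8 := by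
  cases c <;> simp [pvMod4]
lemma pvIfMod5 (c : Bool) (a1 a2 a3 a4 a5 a6 a7 a8 : List (Int × List String)) (f : List (Int × List String) → List (Int × List String)) : (if c then (pvD8 a1 a2 a3 a4 a5 a6 a7 a8).modify "parsimony_informative_sites_array" [] f else pvD8 a1 a2 a3 a4 a5 a6 a7 a8) = pvD8 a1 a2 a3 a4 (if c then f a5 else a5) a6 a7 a8 := by
  cases c <;> simp [pvMod5]
lemma pvIfMod6 (c : Bool) (a1 a2 a3 a4 a5 a6 a7 a8 : List (Int × List String)) (f : List (Int × List String) → List (Int × List String)) : (if c then (pvD8 a1 a2 a3 a4 a5 a6 a7 a8).modify "non_parsimony_informative_sites_array" [] f else pvD8 a1 a2 a3 a4 a5 a6 a7 a8) = pvD8 a1 a2 a3 a4 a5 (if c then f a6 else a6) a7 a8 := by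
  cases c <;> simp [pvMod6]
lemma pvIfMod7 (c : Bool) (a1 a2 a3 a4 a5 a6 a7 a8 : List (Int × List String)) (f : List (Int × List String) → List (Int × List String)) : (if c then (pvD8 a1 a2 a3 a4 a5 a6 a7 a8).modify "invariable_array" [] f else pvD8 a1 a2 a3 a4 a5 a6 a7 a8) = pvD8 a1 a2 a3 a4 a5 a6 (if c then f a7 else a7) a8 := by
  cases c <;> simp [pvMod7]
lemma pvIfMod8 (c : Bool) (a1 a2 a3 a4 a5 a6 a7 a8 : List (Int × List String)) (f : List (Int × List String) → List (Int × List String)) : (if c then (pvD8 a1 a2 a3 a4 a5 a6 a7 a8).modify "gap_array" [] f else pvD8 a1 a2 a3 a4 a5 a6 a7 a8) = pvD8 a1 a2 a3 a4 a5 a6 a7 (if c then f a8 else a8) := by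
  cases c <;> simp [pvMod8]

lemma pvAcc {α : Type} (c : Bool) (a tail : List α) (p : α) :
    (if c then a ++ [p] else a) ++ tail = a ++ (if c then p :: tail else tail) := by
  cases c <;> simp

-- the invariant of A's fold: each slot accumulates the filter of the processed prefix
lemma pvFoldA (pattern : String) (L : List (Int × List String)) :
    ∀ a1 a2 a3 a4 a5 a6 a7 a8,
    L.foldl (fun results p =>
      let col_idx := p.1
      let column := p.2
      let unique_count := count_unique_bases column false
      let _unique_count_with_gaps := count_unique_bases column true
      let has_gap := has_gaps column
      let is_pis := is_parsimony_informative column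
      let results := if ["1", "9", "10"].contains pattern && decide (2 ≤ unique_count) then
        results.modify "variable_array" [] (fun l => l ++ [(col_idx, column)]) else results
      let results := if ["2", "10"].contains pattern && decide (unique_count = 2) then
        results.modify "two_bases_array" [] (fun l => l ++ [(col_idx, column)]) else results
      let results := if ["3", "10"].contains pattern && decide (unique_count = 3) then
        results.modify "three_bases_array" [] (fun l => l ++ [(col_idx, column)]) else results
      let results := if ["4", "10"].contains pattern && decide (unique_count = 4) then
        results.modify "four_bases_array" [] (fun l => l ++ [(col_idx, column)]) else results
      let results := if ["5", "9", "10"].contains pattern && is_pis then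
        results.modify "parsimony_informative_sites_array" [] (fun l => l ++ [(col_idx, column)]) else results
      let results := if ["6", "10"].contains pattern && (decide (2 ≤ unique_count) && !is_pis) then
        results.modify "non_parsimony_informative_sites_array" [] (fun l => l ++ [(col_idx, column)]) else results
      let results := if ["7", "10"].contains pattern && decide (unique_count ≤ 1) then
        results.modify "invariable_array" [] (fun l => l ++ [(col_idx, column)]) else results
      let results := if ["8", "10"].contains pattern && has_gap then
        results.modify "gap_array" [] (fun l => l ++ [(col_idx, column)]) else results
      results) (pvD8 a1 a2 a3 a4 a5 a6 a7 a8)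
    = pvD8
        (a1 ++ L.filter (fun p => ["1", "9", "10"].contains pattern && decide (2 ≤ count_unique_bases p.2 false)))
        (a2 ++ L.filter (fun p => ["2", "10"].contains pattern && decide (count_unique_bases p.2 false = 2)))
        (a3 ++ L.filter (fun p => ["3", "10"].contains pattern && decide (count_unique_bases p.2 false = 3)))
        (a4 ++ L.filter (fun p => ["4", "10"].contains pattern && decide (count_unique_bases p.2 false = 4)))
        (a5 ++ L.filter (fun p => ["5", "9", "10"].contains pattern && is_parsimony_informative p.2))
        (a6 ++ L.filter (fun p => ["6", "10"].contains pattern && (decide (2 ≤ count_unique_bases p.2 false) && !is_parsimony_informative p.2)))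
        (a7 ++ L.filter (fun p => ["7", "10"].contains pattern && decide (count_unique_bases p.2 false ≤ 1)))
        (a8 ++ L.filter (fun p => ["8", "10"].contains pattern && has_gaps p.2)) := by
  induction L with
  | nil => intro a1 a2 a3 a4 a5 a6 a7 a8; simp
  | cons p L ih =>
    intro a1 a2 a3 a4 a5 a6 a7 a8
    rw [List.foldl_cons]
    simp only [pvIfMod1, pvIfMod2, pvIfMod3, pvIfMod4, pvIfMod5, pvIfMod6, pvIfMod7, pvIfMod8]
    rw [ih]
    simp only [List.filter_cons, pvAcc, Prod.mk.eta]

-- B-side: the three scalars from one Counter agree with A's per-column scans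
lemma pvFilter_foldl_add {α : Type} [BEq α] [LawfulBEq α] (p : α → Bool) (l acc : List α) :
    (l.foldl PySem.Set.add acc).filter p = (l.filter p).foldl PySem.Set.add (acc.filter p) := by
  induction l generalizing acc with
  | nil => simp
  | cons x t ih =>
    by_cases hp : p x = true
    · simp only [List.foldl_cons, List.filter_cons, hp, if_pos]
      rw [ih]
      congr 1
      simp only [PySem.Set.add]
      by_cases hx : x ∈ acc
      · simp [hx, List.mem_filter, hp]
      · simp [hx, List.mem_filter, hp, List.filter_append]
    · simp only [List.foldl_cons, List.filter_cons, hp]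
      rw [ih]
      congr 1
      simp only [PySem.Set.add]
      by_cases hx : x ∈ acc
      · simp [hx]
      · simp [hx, List.filter_append, hp]

lemma pvOfList_filter {α : Type} [BEq α] [LawfulBEq α] (p : α → Bool) (l : List α) :
    PySem.Set.ofList (l.filter p) = (PySem.Set.ofList l).filter p := by
  rw [PySem.Set.ofList_eq_foldl, PySem.Set.ofList_eq_foldl, pvFilter_foldl_add]
  rfl

lemma pvUc (col : List String) :
    (((PySem.Dict.counter col).keys.countP (fun b => !(pvG.contains b)) : Nat) : Int)
      = count_unique_bases col false := by
  simp only [count_unique_bases, Bool.false_eq_true, if_false, pvG, PySem.Dict.keys_counter]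
  rw [pvOfList_filter, List.countP_eq_length_filter]

lemma pvGap (col : List String) :
    decide (count_unique_bases col false < ((PySem.Dict.counter col).keys.length : Int))
      = has_gaps col := by
  simp only [count_unique_bases, Bool.false_eq_true, if_false, PySem.Dict.keys_counter, has_gaps]
  rw [pvOfList_filter, Bool.eq_iff_iff]
  simp only [decide_eq_true_eq, Nat.cast_lt, List.any_eq_true]
  rw [List.length_filter_lt_length_iff_exists]
  constructor
  · rintro ⟨x, hx, hpx⟩
    refine ⟨x, (PySem.Set.mem_ofList _ _).1 hx, ?_⟩
    revert hpx
    cases hc : (["-", "N", "?"].contains x) <;> simp_all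
  · rintro ⟨x, hx, hpx⟩
    refine ⟨x, (PySem.Set.mem_ofList _ _).2 hx, ?_⟩
    simp at hpx
    rcases hpx with h | h | h <;> simp [h]

lemma pvPis (col : List String) :
    decide (2 ≤ (PySem.Dict.counter col).items.countP
        (fun kv => !(pvG.contains kv.1) && decide (2 ≤ kv.2)))
      = is_parsimony_informative col := by
  simp only [is_parsimony_informative, List.length_map, pvG]
  rw [Bool.eq_iff_iff]
  simp only [decide_eq_true_eq]
  rw [← List.countP_eq_length_filter]
  rw [PySem.Dict.items_counter, PySem.Dict.items_counter, List.countP_map, List.countP_map]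
  rw [pvOfList_filter, List.countP_filter]
  refine Iff.of_eq (congrArg (2 ≤ ·) (List.countP_congr ?_))
  intro k _
  simp only [Function.comp_apply]
  by_cases h1 : k = "-"
  · simp [h1]
  by_cases h2 : k = "N"
  · simp [h2]
  by_cases h3 : k = "?"
  · simp [h3]
  simp [h1, h2, h3]

lemma pvStats_eq (sequences : List (List String)) (j : Nat) :
    pvStats sequences j
      = (count_unique_bases (pvCol sequences j) false,
         has_gaps (pvCol sequences j), is_parsimony_informative (pvCol sequences j)) := by
  simp only [pvStats, pvUc, pvGap, pvPis]

lemma pvEnum {α : Type} (g : Nat → α) (n : Nat) :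
    PySem.List.enumerate ((List.range n).map g) 0 = (List.range n).map (fun (j : Nat) => ((j : Int), g j)) := by
  induction n with
  | zero => rfl
  | succ n ih =>
    rw [List.range_succ, List.map_append, PySem.List.enumerate_append, ih, List.map_append]
    simp [PySem.List.enumerate_cons]

lemma pvTranspose (sequences : List (List String)) (h : sequences ≠ []) :
    transpose_matrix sequences
      = (List.range (((sequences.map List.length).min?).getD 0)).map (pvCol sequences) := by
  obtain ⟨r0, rest, rfl⟩ := List.exists_cons_of_ne_nil h
  by_cases h0 : r0 = []
  · subst h0
    have hn : ((((([] : List String) :: rest).map List.length).min?).getD 0) = 0 := by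
      simp only [List.map_cons, List.length_nil, List.min?_cons, Option.getD_some]
      cases hm : (rest.map List.length).min? <;> simp
    rw [hn]
    simp [transpose_matrix]
  · rw [transpose_matrix, if_neg (by simp [h0])]
    rfl

lemma pvComp (sequences : List (List String)) (h : sequences ≠ []) (w : Bool)
    (q : List String → Bool) (p' : Int × Bool × Bool → Bool)
    (hq : ∀ j, p' (pvStats sequences j) = q (pvCol sequences j)) :
    (PySem.List.enumerate (transpose_matrix sequences) 0).filter (fun pr => w && q pr.2)
      = if w then pvPick sequences (((sequences.map List.length).min?).getD 0) p' else [] := by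
  cases w with
  | false => simp
  | true =>
    rw [if_pos rfl]
    simp only [Bool.true_and]
    rw [pvTranspose sequences h, pvEnum, List.filter_map, pvPick]
    congr 1
    apply List.filter_congr
    intro j _
    simp only [Function.comp_apply]
    exact (hq j).symm

-- ===== VERDICT (by name: the statement is the Claim_ definition above) =====
theorem analyze_sites_by_pattern_spec : Claim_equal_analyze_sites_by_pattern := by
  intro sequences pattern _
  unfold Spec_analyze_sites_by_pattern
  by_cases h : sequences = []
  · simp [analyze_sites_by_pattern, analyze_sites_by_pattern_alt, h]
  · simp only [analyze_sites_by_pattern, analyze_sites_by_pattern_alt, if_neg h]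
    rw [pvInit, pvFoldA]
    simp only [pvD8, List.nil_append]
    rw [pvComp sequences h (["1", "9", "10"].contains pattern) (fun col => decide (2 ≤ count_unique_bases col false)) (fun s => decide (2 ≤ s.1)) (fun j => by rw [pvStats_eq]),
        pvComp sequences h (["2", "10"].contains pattern) (fun col => decide (count_unique_bases col false = 2)) (fun s => decide (s.1 = 2)) (fun j => by rw [pvStats_eq]),
        pvComp sequences h (["3", "10"].contains pattern) (fun col => decide (count_unique_bases col false = 3)) (fun s => decide (s.1 = 3)) (fun j => by rw [pvStats_eq]),
        pvComp sequences h (["4", "10"].contains pattern) (fun col => decide (count_unique_bases col false = 4)) (fun s => decide (s.1 = 4)) (fun j => by rw [pvStats_eq]),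
        pvComp sequences h (["5", "9", "10"].contains pattern) (fun col => is_parsimony_informative col) (fun s => s.2.2) (fun j => by rw [pvStats_eq]),
        pvComp sequences h (["6", "10"].contains pattern) (fun col => decide (2 ≤ count_unique_bases col false) && !is_parsimony_informative col) (fun s => decide (2 ≤ s.1) && !s.2.2) (fun j => by rw [pvStats_eq]),
        pvComp sequences h (["7", "10"].contains pattern) (fun col => decide (count_unique_bases col false ≤ 1)) (fun s => decide (s.1 ≤ 1)) (fun j => by rw [pvStats_eq]),
        pvComp sequences h (["8", "10"].contains pattern) (fun col => has_gaps col) (fun s => s.2.1) (fun j => by rw [pvStats_eq])]
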